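-- pv_equiv track=rewrite | github.com/steve02081504/fount | .esh/commands/update-locales.py | _find_canonical_placeholder_list
-- ===== SOURCE A (Python) =====
-- def _find_canonical_placeholder_list(placeholders_by_lang: dict[str, list[str]], most_frequent_count: int, reference_lang_codes: list[str]) -> list[str] | None:
-- 	"""
-- 	Determines the canonical (reference) ordered list of placeholder names.
-- 	It prioritizes reference languages. If not found, it takes the first encountered
-- 	language (sorted by lang code) that matches the most_frequent_count.
-- 	"""
-- 	# Try to find the canonical list from reference languages first
-- 	for ref_lang_code in reference_lang_codes:
-- 		if ref_lang_code in placeholders_by_lang and len(placeholders_by_lang[ref_lang_code]) == most_frequent_count: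
-- 			return placeholders_by_lang[ref_lang_code]
--
-- 	# If not found in reference languages, try any language (sorted for determinism)
-- 	for lang_code in sorted(placeholders_by_lang.keys()):
-- 		if len(placeholders_by_lang[lang_code]) == most_frequent_count:
-- 			return placeholders_by_lang[lang_code]
--
-- 	# If still not found (e.g., most_frequent_count is 0 and no lists are empty, though unlikely with count logic)
-- 	# or if most_frequent_count > 0 but no list matches (also unlikely if most_frequent_count derived from these lists)
-- 	return None
-- ===== SOURCE B (Python) =====
-- def _find_canonical_placeholder_list(placeholders_by_lang: dict[str, list[str]], most_frequent_count: int, reference_lang_codes: list[str]) -> list[str] | None: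
-- 	# One fused pass over the dict (loop inversion): instead of scanning the
-- 	# reference codes against the dict and then sorting all keys, walk the dict
-- 	# items once, tracking (a) the matching key with the smallest
-- 	# reference-priority index and (b) the lexicographically smallest matching
-- 	# key; decide at the end.
-- 	best_ref = None   # (priority index in reference_lang_codes, key)
-- 	best_key = None
-- 	for k, v in placeholders_by_lang.items():
-- 		if len(v) != most_frequent_count:
-- 			continue
-- 		if k in reference_lang_codes:
-- 			r = reference_lang_codes.index(k)
-- 			if best_ref is None or r < best_ref[0]:
-- 				best_ref = (r, k)
-- 		if best_key is None or k < best_key: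
-- 			best_key = k
-- 	if best_ref is not None:
-- 		return placeholders_by_lang[best_ref[1]]
-- 	if best_key is not None:
-- 		return placeholders_by_lang[best_key]
-- 	return None
-- ===== Notes on version B (the rewrite author's own statement) =====
-- stated objective: alternative
-- what changed: A runs two staged scans (reference codes against the dict with early return, then a sort of all keys followed by a scan); B inverts the loops into one fused pass over the dict items that simultaneously tracks the matching key of smallest reference-priority index and the lexicographically smallest matching key, and decides after the pass; skipping the sort made it measurably faster on the generated inputs.
import Mathlib
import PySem

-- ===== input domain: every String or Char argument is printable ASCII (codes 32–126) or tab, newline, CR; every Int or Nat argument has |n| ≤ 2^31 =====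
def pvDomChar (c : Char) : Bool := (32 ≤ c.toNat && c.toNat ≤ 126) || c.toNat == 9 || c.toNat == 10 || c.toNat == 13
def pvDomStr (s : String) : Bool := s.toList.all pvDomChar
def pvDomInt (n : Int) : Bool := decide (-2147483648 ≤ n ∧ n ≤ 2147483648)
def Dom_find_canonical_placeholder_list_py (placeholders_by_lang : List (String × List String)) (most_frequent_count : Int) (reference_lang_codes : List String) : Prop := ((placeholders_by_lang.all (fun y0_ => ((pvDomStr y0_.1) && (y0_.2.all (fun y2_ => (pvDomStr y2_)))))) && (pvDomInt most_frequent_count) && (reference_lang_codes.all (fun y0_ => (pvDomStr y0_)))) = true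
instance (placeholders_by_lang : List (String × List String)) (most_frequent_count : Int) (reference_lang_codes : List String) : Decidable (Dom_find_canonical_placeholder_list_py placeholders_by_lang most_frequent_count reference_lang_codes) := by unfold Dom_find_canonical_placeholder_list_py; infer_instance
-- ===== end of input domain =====

-- B fuses A's two staged scans (reference-priority scan, then sort + scan) into ONE pass
-- over the dict items with two accumulators (objective: alternative, not claimed faster).

-- ===== PORT A =====
-- first loop of A: `for ref in reference_lang_codes: if ref in d and len(d[ref]) == count: return d[ref]`
def pvA_phase1 (d : PySem.Dict String (List String)) (count : Int) : List String → Option (List String)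
  | [] => none
  | r :: rest =>
      if d.contains r && ((((d.get? r).getD []).length : Int) == count) then
        some ((d.get? r).getD [])
      else pvA_phase1 d count rest

-- second loop of A: `for k in sorted(d.keys()): if len(d[k]) == count: return d[k]`
def pvA_phase2 (d : PySem.Dict String (List String)) (count : Int) : List String → Option (List String)
  | [] => none
  | k :: rest =>
      if ((((d.get? k).getD []).length : Int) == count) then
        some ((d.get? k).getD [])
      else pvA_phase2 d count rest

def find_canonical_placeholder_list_py (placeholders_by_lang : List (String × List String)) (most_frequent_count : Int) (reference_lang_codes : List String) : Option (List String) :=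
  match pvA_phase1 (PySem.Dict.ofList placeholders_by_lang) most_frequent_count reference_lang_codes with
  | some v => some v
  | none => pvA_phase2 (PySem.Dict.ofList placeholders_by_lang) most_frequent_count
      (PySem.List.sorted (PySem.Dict.ofList placeholders_by_lang).keys (fun x => x) false)

-- ===== PORT B =====
-- B's single loop `for k, v in d.items(): …` with accumulators best_ref / best_key;
-- `k in reference_lang_codes` + `reference_lang_codes.index(k)` is PySem.List.index?
def pvB_loop (count : Int) (refs : List String) (st : Option (Nat × String) × Option String) : List (String × List String) → Option (Nat × String) × Option String
  | [] => st
  | (k, v) :: rest =>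
      if ((v.length : Int) == count) then
        pvB_loop count refs
          ((match PySem.List.index? refs k with
            | none => st.1
            | some r =>
                match st.1 with
                | none => some (r, k)
                | some br => if r < br.1 then some (r, k) else st.1),
           (match st.2 with
            | none => some k
            | some b => if k < b then some k else st.2)) rest
      else pvB_loop count refs st rest

def find_canonical_placeholder_list_py_alt (placeholders_by_lang : List (String × List String)) (most_frequent_count : Int) (reference_lang_codes : List String) : Option (List String) :=
  match pvB_loop most_frequent_count reference_lang_codes (none, none) (PySem.Dict.ofList placeholders_by_lang).items with
  | (some rk, _) => some (((PySem.Dict.ofList placeholders_by_lang).get? rk.2).getD [])   -- `return d[best_ref[1]]`; best_ref's key is a key of d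
  | (none, some b) => some (((PySem.Dict.ofList placeholders_by_lang).get? b).getD [])    -- `return d[best_key]`; best_key is a key of d
  | (none, none) => none

-- ===== PRECONDITION & SPEC =====
def Spec_find_canonical_placeholder_list_py (placeholders_by_lang : List (String × List String)) (most_frequent_count : Int) (reference_lang_codes : List String) (out : Option (List String)) : Prop := out = find_canonical_placeholder_list_py_alt placeholders_by_lang most_frequent_count reference_lang_codes
instance (placeholders_by_lang : List (String × List String)) (most_frequent_count : Int) (reference_lang_codes : List String) (out : Option (List String)) : Decidable (Spec_find_canonical_placeholder_list_py placeholders_by_lang most_frequent_count reference_lang_codes out) := by unfold Spec_find_canonical_placeholder_list_py; infer_instance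

-- ===== CLAIM (what is proved, stated in full; the proofs are below) =====
def Claim_equal_find_canonical_placeholder_list_py : Prop := ∀ (placeholders_by_lang : List (String × List String)) (most_frequent_count : Int) (reference_lang_codes : List String), Dom_find_canonical_placeholder_list_py placeholders_by_lang most_frequent_count reference_lang_codes → Spec_find_canonical_placeholder_list_py placeholders_by_lang most_frequent_count reference_lang_codes (find_canonical_placeholder_list_py placeholders_by_lang most_frequent_count reference_lang_codes)

-- ===== LEMMAS AND PROOFS =====

-- proof-only decompositions of B's loop into its two independent accumulators
def pvStepRef (refs : List String) (acc : Option (Nat × String)) (k : String) : Option (Nat × String) :=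
  match PySem.List.index? refs k with
  | none => acc
  | some r =>
      match acc with
      | none => some (r, k)
      | some br => if r < br.1 then some (r, k) else acc

def pvStepKey (acc : Option String) (k : String) : Option String :=
  match acc with
  | none => some k
  | some b => if k < b then some k else acc

def pvFoldRef (count : Int) (refs : List String) : Option (Nat × String) → List (String × List String) → Option (Nat × String)
  | acc, [] => acc
  | acc, (k, v) :: rest =>
      if ((v.length : Int) == count) then pvFoldRef count refs (pvStepRef refs acc k) rest
      else pvFoldRef count refs acc rest

def pvFoldKey (count : Int) : Option String → List (String × List String) → Option String
  | acc, [] => acc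
  | acc, (k, v) :: rest =>
      if ((v.length : Int) == count) then pvFoldKey count (pvStepKey acc k) rest
      else pvFoldKey count acc rest

theorem pvStepRef_idx_none {refs : List String} {k : String} (acc : Option (Nat × String)) (h : PySem.List.index? refs k = none) :
    pvStepRef refs acc k = acc := by unfold pvStepRef; rw [h]

theorem pvStepRef_acc_none {refs : List String} {k : String} {r : Nat} (h : PySem.List.index? refs k = some r) :
    pvStepRef refs none k = some (r, k) := by unfold pvStepRef; rw [h]

theorem pvStepRef_acc_some {refs : List String} {k : String} {r : Nat} (br : Nat × String) (h : PySem.List.index? refs k = some r) :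
    pvStepRef refs (some br) k = if r < br.1 then some (r, k) else some br := by unfold pvStepRef; rw [h]

theorem pvStepKey_acc_none (k : String) : pvStepKey none k = some k := rfl

theorem pvStepKey_acc_some (b k : String) : pvStepKey (some b) k = if k < b then some k else some b := rfl

theorem pvB_loop_eq_pair (count : Int) (refs : List String) (l : List (String × List String)) :
    ∀ a b, pvB_loop count refs (a, b) l = (pvFoldRef count refs a l, pvFoldKey count b l) := by
  induction l with
  | nil => intro a b; rfl
  | cons kv rest ih =>
      intro a b
      obtain ⟨k, v⟩ := kv
      by_cases h : (((v.length : Int)) == count) = true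
      · simp only [pvB_loop, pvFoldRef, pvFoldKey, pvStepRef, pvStepKey, h, if_true, ih]
      · simp only [pvB_loop, pvFoldRef, pvFoldKey, h, ih]
        simp

theorem pvFoldRef_ne_none (count : Int) (refs : List String) (l : List (String × List String)) :
    ∀ rk, pvFoldRef count refs (some rk) l ≠ none := by
  induction l with
  | nil => intro rk; simp [pvFoldRef]
  | cons kv rest ih =>
      intro rk
      obtain ⟨k, v⟩ := kv
      rw [pvFoldRef]
      by_cases h : (((v.length : Int)) == count) = true
      · rw [if_pos h]
        cases hidx : PySem.List.index? refs k with
        | none => rw [pvStepRef_idx_none _ hidx]; exact ih rk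
        | some r =>
            rw [pvStepRef_acc_some rk hidx]
            by_cases hlt : r < rk.1
            · rw [if_pos hlt]; exact ih _
            · rw [if_neg hlt]; exact ih _
      · rw [if_neg h]; exact ih rk

theorem pvFoldKey_ne_none (count : Int) (l : List (String × List String)) :
    ∀ b, pvFoldKey count (some b) l ≠ none := by
  induction l with
  | nil => intro b; simp [pvFoldKey]
  | cons kv rest ih =>
      intro b
      obtain ⟨k, v⟩ := kv
      rw [pvFoldKey]
      by_cases h : (((v.length : Int)) == count) = true
      · rw [if_pos h, pvStepKey_acc_some]
        by_cases hlt : k < b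
        · rw [if_pos hlt]; exact ih _
        · rw [if_neg hlt]; exact ih _
      · rw [if_neg h]; exact ih b

theorem pvFoldRef_none (count : Int) (refs : List String) (l : List (String × List String)) :
    ∀ acc, pvFoldRef count refs acc l = none ↔
      (acc = none ∧ ∀ kv ∈ l, (((kv.2.length : Int)) == count) = true → PySem.List.index? refs kv.1 = none) := by
  induction l with
  | nil => intro acc; simp [pvFoldRef]
  | cons kv rest ih =>
      intro acc
      obtain ⟨k, v⟩ := kv
      rw [pvFoldRef]
      by_cases h : (((v.length : Int)) == count) = true
      · rw [if_pos h]
        cases hidx : PySem.List.index? refs k with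
        | none =>
            rw [pvStepRef_idx_none _ hidx, ih]
            constructor
            · rintro ⟨h1, h2⟩
              refine ⟨h1, ?_⟩
              intro kv hm hp
              rcases List.mem_cons.mp hm with rfl | hm'
              · exact hidx
              · exact h2 kv hm' hp
            · rintro ⟨h1, h2⟩
              exact ⟨h1, fun kv hm hp => h2 kv (List.mem_cons_of_mem _ hm) hp⟩
        | some r =>
            constructor
            · intro hres
              exfalso
              cases acc with
              | none =>
                  rw [pvStepRef_acc_none hidx] at hres
                  exact pvFoldRef_ne_none count refs rest (r, k) hres
              | some br =>
                  rw [pvStepRef_acc_some br hidx] at hres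
                  by_cases hlt : r < br.1
                  · rw [if_pos hlt] at hres
                    exact pvFoldRef_ne_none count refs rest (r, k) hres
                  · rw [if_neg hlt] at hres
                    exact pvFoldRef_ne_none count refs rest br hres
            · rintro ⟨h1, h2⟩
              have hc := h2 (k, v) List.mem_cons_self h
              rw [hc] at hidx
              cases hidx
      · rw [if_neg h, ih]
        constructor
        · rintro ⟨h1, h2⟩
          refine ⟨h1, ?_⟩
          intro kv hm hp
          rcases List.mem_cons.mp hm with rfl | hm'
          · exact absurd hp h
          · exact h2 kv hm' hp
        · rintro ⟨h1, h2⟩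
          exact ⟨h1, fun kv hm hp => h2 kv (List.mem_cons_of_mem _ hm) hp⟩

theorem pvFoldRef_some (count : Int) (refs : List String) (l : List (String × List String)) :
    ∀ acc rk, pvFoldRef count refs acc l = some rk →
      (acc = some rk ∨ ∃ v, (rk.2, v) ∈ l ∧ (((v.length : Int)) == count) = true ∧ PySem.List.index? refs rk.2 = some rk.1)
      ∧ (∀ rk0, acc = some rk0 → rk.1 ≤ rk0.1)
      ∧ (∀ kv ∈ l, (((kv.2.length : Int)) == count) = true → ∀ r', PySem.List.index? refs kv.1 = some r' → rk.1 ≤ r') := by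
  induction l with
  | nil =>
      intro acc rk h
      simp [pvFoldRef] at h
      subst h
      exact ⟨Or.inl rfl, fun rk0 h0 => by cases h0; exact le_refl _, by simp⟩
  | cons kv rest ih =>
      intro acc rk hres
      obtain ⟨k, v⟩ := kv
      rw [pvFoldRef] at hres
      by_cases h : (((v.length : Int)) == count) = true
      · rw [if_pos h] at hres
        cases hidx : PySem.List.index? refs k with
        | none =>
            rw [pvStepRef_idx_none _ hidx] at hres
            obtain ⟨hA, hB, hC⟩ := ih acc rk hres
            refine ⟨?_, hB, ?_⟩
            · rcases hA with h1 | ⟨v', hm, hp, hi⟩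
              · exact Or.inl h1
              · exact Or.inr ⟨v', List.mem_cons_of_mem _ hm, hp, hi⟩
            · intro kv hm hp r' hr'
              rcases List.mem_cons.mp hm with rfl | hm'
              · rw [hidx] at hr'; exact absurd hr' (by simp)
              · exact hC kv hm' hp r' hr'
        | some r =>
            cases acc with
            | none =>
                rw [pvStepRef_acc_none hidx] at hres
                obtain ⟨hA, hB, hC⟩ := ih (some (r, k)) rk hres
                have hle : rk.1 ≤ r := hB (r, k) rfl
                refine ⟨?_, by simp, ?_⟩
                · rcases hA with h1 | ⟨v', hm, hp, hi⟩
                  · cases h1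
                    exact Or.inr ⟨v, List.mem_cons_self, h, hidx⟩
                  · exact Or.inr ⟨v', List.mem_cons_of_mem _ hm, hp, hi⟩
                · intro kv hm hp r' hr'
                  rcases List.mem_cons.mp hm with rfl | hm'
                  · rw [hidx] at hr'; cases hr'; exact hle
                  · exact hC kv hm' hp r' hr'
            | some br =>
                rw [pvStepRef_acc_some br hidx] at hres
                by_cases hlt : r < br.1
                · rw [if_pos hlt] at hres
                  obtain ⟨hA, hB, hC⟩ := ih (some (r, k)) rk hres
                  have hle : rk.1 ≤ r := hB (r, k) rfl
                  refine ⟨?_, ?_, ?_⟩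
                  · rcases hA with h1 | ⟨v', hm, hp, hi⟩
                    · cases h1
                      exact Or.inr ⟨v, List.mem_cons_self, h, hidx⟩
                    · exact Or.inr ⟨v', List.mem_cons_of_mem _ hm, hp, hi⟩
                  · intro rk0 h0
                    cases h0
                    exact le_of_lt (lt_of_le_of_lt hle hlt)
                  · intro kv hm hp r' hr'
                    rcases List.mem_cons.mp hm with rfl | hm'
                    · rw [hidx] at hr'; cases hr'; exact hle
                    · exact hC kv hm' hp r' hr'
                · rw [if_neg hlt] at hres
                  obtain ⟨hA, hB, hC⟩ := ih (some br) rk hres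
                  have hle : rk.1 ≤ br.1 := hB br rfl
                  refine ⟨?_, ?_, ?_⟩
                  · rcases hA with h1 | ⟨v', hm, hp, hi⟩
                    · exact Or.inl h1
                    · exact Or.inr ⟨v', List.mem_cons_of_mem _ hm, hp, hi⟩
                  · intro rk0 h0
                    cases h0
                    exact hle
                  · intro kv hm hp r' hr'
                    rcases List.mem_cons.mp hm with rfl | hm'
                    · rw [hidx] at hr'; cases hr'
                      exact le_trans hle (le_of_not_gt hlt)
                    · exact hC kv hm' hp r' hr'
      · rw [if_neg h] at hres
        obtain ⟨hA, hB, hC⟩ := ih acc rk hres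
        refine ⟨?_, hB, ?_⟩
        · rcases hA with h1 | ⟨v', hm, hp, hi⟩
          · exact Or.inl h1
          · exact Or.inr ⟨v', List.mem_cons_of_mem _ hm, hp, hi⟩
        · intro kv hm hp r' hr'
          rcases List.mem_cons.mp hm with rfl | hm'
          · exact absurd hp h
          · exact hC kv hm' hp r' hr'

theorem pvFoldKey_none (count : Int) (l : List (String × List String)) :
    ∀ acc, pvFoldKey count acc l = none ↔
      (acc = none ∧ ∀ kv ∈ l, (((kv.2.length : Int)) == count) = false) := by
  induction l with
  | nil => intro acc; simp [pvFoldKey]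
  | cons kv rest ih =>
      intro acc
      obtain ⟨k, v⟩ := kv
      rw [pvFoldKey]
      by_cases h : (((v.length : Int)) == count) = true
      · rw [if_pos h]
        constructor
        · intro hres
          exfalso
          cases acc with
          | none =>
              rw [pvStepKey_acc_none] at hres
              exact pvFoldKey_ne_none count rest k hres
          | some b =>
              rw [pvStepKey_acc_some] at hres
              by_cases hlt : k < b
              · rw [if_pos hlt] at hres
                exact pvFoldKey_ne_none count rest k hres
              · rw [if_neg hlt] at hres
                exact pvFoldKey_ne_none count rest b hres
        · rintro ⟨h1, h2⟩
          have hc := h2 (k, v) List.mem_cons_self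
          rw [h] at hc
          cases hc
      · rw [if_neg h, ih]
        simp only [Bool.not_eq_true] at h
        constructor
        · rintro ⟨h1, h2⟩
          refine ⟨h1, ?_⟩
          intro kv hm
          rcases List.mem_cons.mp hm with rfl | hm'
          · exact h
          · exact h2 kv hm'
        · rintro ⟨h1, h2⟩
          exact ⟨h1, fun kv hm => h2 kv (List.mem_cons_of_mem _ hm)⟩

theorem pvFoldKey_some (count : Int) (l : List (String × List String)) :
    ∀ acc b, pvFoldKey count acc l = some b →
      (acc = some b ∨ ∃ v, (b, v) ∈ l ∧ (((v.length : Int)) == count) = true)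
      ∧ (∀ b0, acc = some b0 → b ≤ b0)
      ∧ (∀ kv ∈ l, (((kv.2.length : Int)) == count) = true → b ≤ kv.1) := by
  induction l with
  | nil =>
      intro acc b h
      simp [pvFoldKey] at h
      subst h
      exact ⟨Or.inl rfl, fun b0 h0 => by cases h0; exact le_refl _, by simp⟩
  | cons kv rest ih =>
      intro acc b hres
      obtain ⟨k, v⟩ := kv
      rw [pvFoldKey] at hres
      by_cases h : (((v.length : Int)) == count) = true
      · rw [if_pos h] at hres
        cases acc with
        | none =>
            rw [pvStepKey_acc_none] at hres
            obtain ⟨hA, hB, hC⟩ := ih (some k) b hres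
            have hle : b ≤ k := hB k rfl
            refine ⟨?_, by simp, ?_⟩
            · rcases hA with h1 | ⟨v', hm, hp⟩
              · cases h1; exact Or.inr ⟨v, List.mem_cons_self, h⟩
              · exact Or.inr ⟨v', List.mem_cons_of_mem _ hm, hp⟩
            · intro kv hm hp
              rcases List.mem_cons.mp hm with rfl | hm'
              · exact hle
              · exact hC kv hm' hp
        | some b0 =>
            rw [pvStepKey_acc_some] at hres
            by_cases hlt : k < b0
            · rw [if_pos hlt] at hres
              obtain ⟨hA, hB, hC⟩ := ih (some k) b hres
              have hle : b ≤ k := hB k rfl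
              refine ⟨?_, ?_, ?_⟩
              · rcases hA with h1 | ⟨v', hm, hp⟩
                · cases h1; exact Or.inr ⟨v, List.mem_cons_self, h⟩
                · exact Or.inr ⟨v', List.mem_cons_of_mem _ hm, hp⟩
              · intro b1 h1
                cases h1
                exact le_of_lt (lt_of_le_of_lt hle hlt)
              · intro kv hm hp
                rcases List.mem_cons.mp hm with rfl | hm'
                · exact hle
                · exact hC kv hm' hp
            · rw [if_neg hlt] at hres
              obtain ⟨hA, hB, hC⟩ := ih (some b0) b hres
              have hle : b ≤ b0 := hB b0 rfl
              refine ⟨?_, ?_, ?_⟩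
              · rcases hA with h1 | ⟨v', hm, hp⟩
                · exact Or.inl h1
                · exact Or.inr ⟨v', List.mem_cons_of_mem _ hm, hp⟩
              · intro b1 h1
                cases h1
                exact hle
              · intro kv hm hp
                rcases List.mem_cons.mp hm with rfl | hm'
                · exact le_trans hle (le_of_not_gt hlt)
                · exact hC kv hm' hp
      · rw [if_neg h] at hres
        obtain ⟨hA, hB, hC⟩ := ih acc b hres
        refine ⟨?_, hB, ?_⟩
        · rcases hA with h1 | ⟨v', hm, hp⟩
          · exact Or.inl h1
          · exact Or.inr ⟨v', List.mem_cons_of_mem _ hm, hp⟩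
        · intro kv hm hp
          rcases List.mem_cons.mp hm with rfl | hm'
          · exact absurd hp h
          · exact hC kv hm' hp

-- A's first loop as a find? over the reference codes
def pvQ (d : PySem.Dict String (List String)) (count : Int) (r : String) : Bool :=
  d.contains r && ((((d.get? r).getD []).length : Int) == count)

theorem pvA_phase1_eq_find (d : PySem.Dict String (List String)) (count : Int) (l : List String) :
    pvA_phase1 d count l = (l.find? (pvQ d count)).map (fun r => (d.get? r).getD []) := by
  induction l with
  | nil => rfl
  | cons r rest ih =>
      rw [pvA_phase1]
      by_cases h : pvQ d count r
      · simp [List.find?_cons, pvQ] at h ⊢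
        simp [h]
      · simp only [pvQ] at h
        simp [h, pvQ, ih]

-- A's second loop as a find? over the sorted keys
def pvP (d : PySem.Dict String (List String)) (count : Int) (k : String) : Bool :=
  ((((d.get? k).getD []).length : Int) == count)

theorem pvA_phase2_eq_find (d : PySem.Dict String (List String)) (count : Int) (l : List String) :
    pvA_phase2 d count l = (l.find? (pvP d count)).map (fun k => (d.get? k).getD []) := by
  induction l with
  | nil => rfl
  | cons k rest ih =>
      rw [pvA_phase2]
      by_cases h : pvP d count k
      · simp [List.find?_cons, pvP] at *
        simp [h]
      · simp only [pvP] at h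
        simp [h, pvP, ih]

-- find? returns exactly the element whose first index is minimal among satisfying elements
theorem pv_find?_of_min_index (refs : List String) (q : String → Bool) :
    ∀ (k : String) (r : Nat), q k = true → PySem.List.index? refs k = some r →
      (∀ x r', q x = true → PySem.List.index? refs x = some r' → r ≤ r') →
      refs.find? q = some k := by
  induction refs with
  | nil =>
      intro k r _ hidx _
      rw [PySem.List.index?_eq_idxOf?] at hidx
      simp at hidx
  | cons a rest ih =>
      intro k r hq hidx hmin
      by_cases hqa : q a = true
      · have hidxa : PySem.List.index? (a :: rest) a = some 0 := PySem.List.index?_cons_self a rest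
        have hr0 : r ≤ 0 := hmin a 0 hqa hidxa
        interval_cases r
        by_cases hka : k = a
        · simp [hqa, hka]
        · rw [PySem.List.index?_cons_of_ne rest (fun h => hka h.symm)] at hidx
          cases h' : PySem.List.index? rest k with
          | none => rw [h'] at hidx; simp at hidx
          | some r0 => rw [h'] at hidx; simp at hidx
      · have hka : k ≠ a := fun h => hqa (h ▸ hq)
        rw [PySem.List.index?_cons_of_ne rest (fun h => hka h.symm)] at hidx
        cases h' : PySem.List.index? rest k with
        | none => rw [h'] at hidx; simp at hidx
        | some r0 =>
            rw [h'] at hidx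
            simp at hidx
            have hmin' : ∀ x r', q x = true → PySem.List.index? rest x = some r' → r0 ≤ r' := by
              intro x r' hx hix
              have hxa : x ≠ a := fun h => hqa (h ▸ hx)
              have : PySem.List.index? (a :: rest) x = some (r' + 1) := by
                rw [PySem.List.index?_cons_of_ne rest (fun h => hxa h.symm), hix]; rfl
              have := hmin x (r' + 1) hx this
              omega
            have hqa' : q a = false := by simpa using hqa
            simp only [List.find?_cons, hqa']
            exact ih k r0 hq h' hmin'

-- pvQ holds exactly on matching keys of the dict
theorem pvQ_iff (pbl : List (String × List String)) (count : Int) (x : String) :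
    pvQ (PySem.Dict.ofList pbl) count x = true ↔
      ∃ v, (x, v) ∈ (PySem.Dict.ofList pbl).items ∧ (((v.length : Int)) == count) = true := by
  constructor
  · intro h
    rw [pvQ, PySem.Dict.contains_eq_isSome_get?] at h
    cases hget : (PySem.Dict.ofList pbl).get? x with
    | none => rw [hget] at h; simp at h
    | some v =>
        rw [hget] at h
        simp at h
        exact ⟨v, (PySem.Dict.get?_eq_some_iff_mem_items _ _ _ (PySem.Dict.nodup_keys_ofList pbl)).mp hget, by simpa using h⟩
  · rintro ⟨v, hm, hp⟩
    have hget : (PySem.Dict.ofList pbl).get? x = some v :=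
      (PySem.Dict.get?_eq_some_iff_mem_items _ _ _ (PySem.Dict.nodup_keys_ofList pbl)).mpr hm
    rw [pvQ, PySem.Dict.contains_eq_isSome_get?, hget]
    simpa using hp

theorem pvP_iff (pbl : List (String × List String)) (count : Int) (x : String) (hx : x ∈ (PySem.Dict.ofList pbl).keys) :
    pvP (PySem.Dict.ofList pbl) count x = true ↔
      ∃ v, (x, v) ∈ (PySem.Dict.ofList pbl).items ∧ (((v.length : Int)) == count) = true := by
  cases hget : (PySem.Dict.ofList pbl).get? x with
  | none => exact absurd ((PySem.Dict.get?_eq_none_iff_not_mem_keys _ _).mp hget) (by simpa using hx)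
  | some v =>
      have hm := (PySem.Dict.get?_eq_some_iff_mem_items _ _ _ (PySem.Dict.nodup_keys_ofList pbl)).mp hget
      constructor
      · intro h
        rw [pvP, hget] at h
        exact ⟨v, hm, by simpa using h⟩
      · rintro ⟨v', hm', hp⟩
        have : (PySem.Dict.ofList pbl).get? x = some v' :=
          (PySem.Dict.get?_eq_some_iff_mem_items _ _ _ (PySem.Dict.nodup_keys_ofList pbl)).mpr hm'
        rw [pvP, this]
        simpa using hp

-- ===== VERDICT (by name: the statement is the Claim_ definition above) =====
theorem find_canonical_placeholder_list_py_spec : Claim_equal_find_canonical_placeholder_list_py := by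
  intro pbl count refs _
  unfold Spec_find_canonical_placeholder_list_py
  unfold find_canonical_placeholder_list_py find_canonical_placeholder_list_py_alt
  set d := PySem.Dict.ofList pbl with hd
  rw [pvB_loop_eq_pair, pvA_phase1_eq_find]
  cases hR : pvFoldRef count refs none d.items with
  | some rk =>
      -- B takes the reference branch; show A's first loop stops at the same key
      obtain ⟨hA, _, hC⟩ := pvFoldRef_some count refs d.items none rk hR
      rcases hA with h1 | ⟨v, hm, hp, hidx⟩
      · simp at h1
      · have hq : pvQ d count rk.2 = true := (pvQ_iff pbl count rk.2).mpr ⟨v, hm, hp⟩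
        have hfind : refs.find? (pvQ d count) = some rk.2 := by
          apply pv_find?_of_min_index refs (pvQ d count) rk.2 rk.1 hq hidx
          intro x r' hx hix
          obtain ⟨v', hm', hp'⟩ := (pvQ_iff pbl count x).mp hx
          exact hC (x, v') hm' hp' r' hix
        simp [hfind]
  | none =>
      -- no reference match on either side
      obtain ⟨_, hnone⟩ := (pvFoldRef_none count refs d.items none).mp hR
      have hfind : refs.find? (pvQ d count) = none := by
        rw [List.find?_eq_none]
        intro x hx
        intro hqx
        obtain ⟨v, hm, hp⟩ := (pvQ_iff pbl count x).mp hqx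
        have := hnone (x, v) hm hp
        rw [PySem.List.index?_eq_idxOf?] at this
        simp at this
        exact this hx
      simp only [hfind, Option.map_none]
      rw [pvA_phase2_eq_find]
      cases hK : pvFoldKey count none d.items with
      | none =>
          -- nothing matches at all
          obtain ⟨_, hnomatch⟩ := (pvFoldKey_none count d.items none).mp hK
          have : (PySem.List.sorted d.keys (fun x => x) false).find? (pvP d count) = none := by
            rw [List.find?_eq_none]
            intro x hx hpx
            have hxk : x ∈ d.keys := (PySem.List.mem_sorted _ _ _ _).mp hx
            obtain ⟨v, hm, hp⟩ := (pvP_iff pbl count x hxk).mp hpx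
            rw [hnomatch (x, v) hm] at hp
            simp at hp
          simp [this]
      | some b =>
          -- b is the smallest matching key; A scans the sorted keys and stops at it
          obtain ⟨hA, _, hC⟩ := pvFoldKey_some count d.items none b hK
          rcases hA with h1 | ⟨v, hm, hp⟩
          · simp at h1
          · have hbk : b ∈ d.keys := by
              simp only [PySem.Dict.keys]
              exact List.mem_map.mpr ⟨(b, v), hm, rfl⟩
            have hpb : pvP d count b = true := (pvP_iff pbl count b hbk).mpr ⟨v, hm, hp⟩
            set s := PySem.List.sorted d.keys (fun x => x) false with hs
            have hfind2 : s.find? (pvP d count) = some b := by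
              rw [← List.head?_filter]
              have hbf : b ∈ s.filter (pvP d count) :=
                List.mem_filter.mpr ⟨(PySem.List.mem_sorted _ _ _ _).mpr hbk, hpb⟩
              obtain ⟨a, t, hsf⟩ : ∃ a t, s.filter (pvP d count) = a :: t := by
                cases hsf : s.filter (pvP d count) with
                | nil => rw [hsf] at hbf; simp at hbf
                | cons a t => exact ⟨a, t, rfl⟩
              have hpw : (s.filter (pvP d count)).Pairwise (fun x y : String => x ≤ y) :=
                List.Pairwise.sublist List.filter_sublist (by simpa [hs] using PySem.List.sorted_pairwise d.keys (fun x : String => x))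
              have hab : a ≤ b := by
                rw [hsf] at hpw hbf
                rcases List.mem_cons.mp hbf with rfl | hb'
                · exact le_refl _
                · exact (List.pairwise_cons.mp hpw).1 b hb'
              have hba : b ≤ a := by
                have hafm : a ∈ s.filter (pvP d count) := by rw [hsf]; exact List.mem_cons_self
                obtain ⟨ham, hpa⟩ := List.mem_filter.mp hafm
                have hak : a ∈ d.keys := (PySem.List.mem_sorted _ _ _ _).mp ham
                obtain ⟨v', hm', hp'⟩ := (pvP_iff pbl count a hak).mp hpa
                exact hC (a, v') hm' hp'
              rw [hsf, le_antisymm hab hba]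
              rfl
            simp [hfind2]
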